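-- pv_equiv track=rewrite | github.com/Melbride/cbc-kcse-guidance-chatbot | cbc-guidance-chatbot/backend/rag/school_queries.py | _deduplicate_schools
-- ===== SOURCE A (Python) =====
-- def _deduplicate_schools(schools: list[dict]) -> list[dict]:
--     """
--     The DB has one row per subject combination — a school offering 3 pathways
--     appears 3+ times. Deduplicate by (school_name, county), keeping the row
--     with the richest pathways_offered string.
--     """
--     seen: dict[tuple, dict] = {}
--     for school in schools:
--         key = (
--             (school.get("school_name") or "").upper().strip(),
--             (school.get("county") or "").upper().strip(),
--         )
--         if key not in seen:
--             seen[key] = school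
--         else:
--             # Prefer the entry that has more pathways info
--             existing_pw = seen[key].get("pathways_offered") or ""
--             new_pw      = school.get("pathways_offered") or ""
--             if len(str(new_pw)) > len(str(existing_pw)):
--                 seen[key] = school
--     return list(seen.values())
-- ===== SOURCE B (Python) =====
-- def _deduplicate_schools(schools: list[dict]) -> list[dict]:
--     """Two-phase rewrite: group rows by normalized (school_name, county) in one
--     pass, then reduce each bucket with max(key=pathways length), which keeps the
--     first maximal row and thus matches the original's tie-breaking."""
--     grouped: dict[tuple, list[dict]] = {}
--     for school in schools:
--         key = (
--             (school.get("school_name") or "").upper().strip(),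
--             (school.get("county") or "").upper().strip(),
--         )
--         grouped.setdefault(key, []).append(school)
--     return [
--         max(bucket, key=lambda s: len(str(s.get("pathways_offered") or "")))
--         for bucket in grouped.values()
--     ]
-- ===== Notes on version B (the rewrite author's own statement) =====
-- stated objective: alternative
-- what changed: Replaces the single-pass dict of best-so-far rows (lookup + conditional replace per element) by a two-phase decomposition: one grouping pass building buckets per normalized key, then a reduction pass taking the first length-maximal row of each bucket via max(key=...).
import Mathlib
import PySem

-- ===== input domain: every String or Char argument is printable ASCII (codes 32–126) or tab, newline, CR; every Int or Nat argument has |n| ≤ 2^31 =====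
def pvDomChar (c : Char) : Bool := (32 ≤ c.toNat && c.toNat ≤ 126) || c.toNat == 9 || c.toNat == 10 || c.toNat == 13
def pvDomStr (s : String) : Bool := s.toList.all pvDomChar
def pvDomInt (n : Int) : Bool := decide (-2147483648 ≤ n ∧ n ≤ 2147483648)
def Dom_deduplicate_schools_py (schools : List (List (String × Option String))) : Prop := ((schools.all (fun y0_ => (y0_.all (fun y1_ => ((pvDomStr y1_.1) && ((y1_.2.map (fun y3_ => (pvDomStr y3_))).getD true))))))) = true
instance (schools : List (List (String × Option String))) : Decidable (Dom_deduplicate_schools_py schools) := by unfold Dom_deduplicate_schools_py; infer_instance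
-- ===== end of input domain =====

-- B replaces A's single-pass best-so-far dict by a two-phase grouping-then-reduction; alternative decomposition, same cost.


-- ===== PORT A =====
-- shared helpers (identical expressions in both Pythons): school.get(k) or "", the
-- normalized key, and len(str(pathways or "")).
def pvGetOr (school : List (String × Option String)) (k : String) : String :=
  match (PySem.Dict.mk school).get? k with
  | some (some v) => v          -- `v or ""` = v (also when v = "")
  | _ => ""                     -- missing key or None

def pvKey (school : List (String × Option String)) : String × String :=
  (PySem.Str.strip (PySem.Str.upper (pvGetOr school "school_name")),
   PySem.Str.strip (PySem.Str.upper (pvGetOr school "county")))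

def pvLenPW (school : List (String × Option String)) : Int :=
  PySem.Str.len (pvGetOr school "pathways_offered")

def deduplicate_schools_py (schools : List (List (String × Option String))) : List (List (String × Option String)) :=
  (schools.foldl (fun seen school =>
      let key := pvKey school
      match seen.get? key with
      | none => seen.insert key school
      | some existing =>
          if pvLenPW existing < pvLenPW school then seen.insert key school else seen)
    PySem.Dict.empty).values

-- ===== PORT B =====
def pvBest (bucket : List (List (String × Option String))) : List (String × Option String) :=
  PySem.List.maxD bucket pvLenPW []   -- max(bucket, key=…); buckets are never empty

def deduplicate_schools_py_alt (schools : List (List (String × Option String))) : List (List (String × Option String)) :=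
  ((schools.foldl (fun grouped school =>
      let key := pvKey school
      grouped.insert key (grouped.getD key [] ++ [school]))   -- setdefault(key, []).append(school)
    PySem.Dict.empty).values).map pvBest

-- ===== PRECONDITION & SPEC =====
def Spec_deduplicate_schools_py (schools : List (List (String × Option String))) (out : List (List (String × Option String))) : Prop := out = deduplicate_schools_py_alt schools
instance (schools : List (List (String × Option String))) (out : List (List (String × Option String))) : Decidable (Spec_deduplicate_schools_py schools out) := by unfold Spec_deduplicate_schools_py; infer_instance

-- ===== CLAIM (what is proved, stated in full; the proofs are below) =====
def Claim_equal_deduplicate_schools_py : Prop := ∀ (schools : List (List (String × Option String))), Dom_deduplicate_schools_py schools → Spec_deduplicate_schools_py schools (deduplicate_schools_py schools)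

-- ===== LEMMAS AND PROOFS =====

-- max over a bucket extended on the right = one strict-improvement step on max of the bucket
theorem pvBest_append (b : List (List (String × Option String))) (s : List (String × Option String)) (hb : b ≠ []) :
    pvBest (b ++ [s]) = if pvLenPW (pvBest b) < pvLenPW s then s else pvBest b := by
  have h : ∃ m, PySem.List.max? b pvLenPW = some m := by
    cases hmx : PySem.List.max? b pvLenPW with
    | none => exact absurd ((PySem.List.max?_eq_none_iff b pvLenPW).mp hmx) hb
    | some m => exact ⟨m, rfl⟩
  rcases h with ⟨m, hm⟩
  simp only [pvBest, PySem.List.maxD, PySem.List.max?, List.foldl_append] at *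
  rw [show List.foldl _ none b = some m from hm]
  simp only [Option.getD_some]
  split_ifs with h <;> simp [h]

theorem pvBest_singleton (s : List (String × Option String)) : pvBest [s] = s := by
  simp [pvBest, PySem.List.maxD, PySem.List.max?]

-- the loop invariant: A's dict holds, at each key, the first length-maximal row of B's bucket
set_option maxHeartbeats 1600000 in
theorem pv_inv (rest : List (List (String × Option String)))
    (a : PySem.Dict (String × String) (List (String × Option String)))
    (g : PySem.Dict (String × String) (List (List (String × Option String))))
    (hnd : g.keys.Nodup)
    (hit : a.items = g.items.map (fun p => (p.1, pvBest p.2)))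
    (hne : ∀ p ∈ g.items, p.2 ≠ []) :
    (rest.foldl (fun seen school =>
        let key := pvKey school
        match seen.get? key with
        | none => seen.insert key school
        | some existing =>
            if pvLenPW existing < pvLenPW school then seen.insert key school else seen) a).items
      = ((rest.foldl (fun grouped school =>
            let key := pvKey school
            grouped.insert key (grouped.getD key [] ++ [school])) g).items).map
          (fun p => (p.1, pvBest p.2)) := by
  induction rest generalizing a g with
  | nil => simpa using hit
  | cons school rest ih =>
    simp only [List.foldl_cons]
    have hkeys : a.keys = g.keys := by
      simp only [PySem.Dict.keys, hit, List.map_map]; rfl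
    have hnda : a.keys.Nodup := hkeys ▸ hnd
    by_cases hc : g.contains (pvKey school) = true
    · -- key already grouped
      obtain ⟨b, hgb⟩ : ∃ b, g.get? (pvKey school) = some b := by
        cases hgk : g.get? (pvKey school) with
        | none => exact absurd ((PySem.Dict.get?_eq_none_iff_contains g _).mp hgk) (by simp [hc])
        | some b => exact ⟨b, rfl⟩
      have hmemb : (pvKey school, b) ∈ g.items := PySem.Dict.mem_items_of_get?_eq_some g hgb
      have hbne : b ≠ [] := hne _ hmemb
      have haget : a.get? (pvKey school) = some (pvBest b) := by
        refine PySem.Dict.get?_of_mem_items a ?_ hnda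
        rw [hit]
        exact List.mem_map_of_mem (f := fun p => (p.1, pvBest p.2)) hmemb
      have hgetD : g.getD (pvKey school) [] = b := PySem.Dict.getD_of_get?_eq_some g [] hgb
      have hcA : a.contains (pvKey school) = true := by
        rw [PySem.Dict.contains_iff_mem_keys, hkeys, ← PySem.Dict.contains_iff_mem_keys]
        exact hc
      -- any entry of g at this key IS (pvKey school, b)
      have hpt : ∀ p ∈ g.items, (p.1 == pvKey school) = true → p.2 = b := by
        intro p hp hpk
        have hp1 : p.1 = pvKey school := by simpa using hpk
        have := PySem.Dict.get?_of_mem_items g (k := p.1) (v := p.2) (by simpa using hp) hnd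
        rw [hp1, hgb] at this
        exact (Option.some.injEq _ _).mp this.symm
      simp only [haget, hgetD]
      by_cases hlt : pvLenPW (pvBest b) < pvLenPW school
      · rw [if_pos hlt]
        apply ih
        · exact PySem.Dict.nodup_keys_insert g _ _ hnd
        · rw [PySem.Dict.items_insert_of_contains a school hcA,
              PySem.Dict.items_insert_of_contains g (b ++ [school]) hc, hit,
              List.map_map, List.map_map]
          refine List.map_congr_left ?_
          intro p hp
          by_cases hpk : (p.1 == pvKey school) = true
          · simp only [Function.comp_apply, hpk, if_pos, hpt p hp hpk,
              pvBest_append b school hbne, if_pos hlt]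
          · simp [Function.comp, hpk]
        · intro p hp
          rcases (PySem.Dict.mem_items_insert g _ _ p).mp hp with rfl | ⟨hp', _⟩
          · simp
          · exact hne _ hp'
      · rw [if_neg hlt]
        apply ih
        · exact PySem.Dict.nodup_keys_insert g _ _ hnd
        · rw [PySem.Dict.items_insert_of_contains g (b ++ [school]) hc, hit, List.map_map]
          refine List.map_congr_left ?_
          intro p hp
          by_cases hpk : (p.1 == pvKey school) = true
          · simp only [Function.comp_apply, hpk, if_pos, hpt p hp hpk,
              pvBest_append b school hbne, if_neg hlt]
            simp [(by simpa using hpk : p.1 = pvKey school)]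
          · simp [Function.comp, hpk]
        · intro p hp
          rcases (PySem.Dict.mem_items_insert g _ _ p).mp hp with rfl | ⟨hp', _⟩
          · simp
          · exact hne _ hp'
    · -- fresh key
      have hcA : a.contains (pvKey school) = false := by
        rw [Bool.eq_false_iff]
        intro hcon
        rw [PySem.Dict.contains_iff_mem_keys, hkeys, ← PySem.Dict.contains_iff_mem_keys] at hcon
        simp [hcon] at hc
      have hcg : g.contains (pvKey school) = false := by simpa using hc
      have haget : a.get? (pvKey school) = none :=
        (PySem.Dict.get?_eq_none_iff_contains a _).mpr hcA
      have hgetD : g.getD (pvKey school) [] = [] := PySem.Dict.getD_of_not_contains g [] hcg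
      simp only [haget, hgetD, List.nil_append]
      apply ih
      · exact PySem.Dict.nodup_keys_insert g _ _ hnd
      · rw [PySem.Dict.items_insert_of_not_contains a school hcA,
            PySem.Dict.items_insert_of_not_contains g [school] hcg, hit]
        simp [pvBest_singleton]
      · intro p hp
        rcases (PySem.Dict.mem_items_insert g _ _ p).mp hp with rfl | ⟨hp', _⟩
        · simp
        · exact hne _ hp' 

-- ===== VERDICT (by name: the statement is the Claim_ definition above) =====
theorem deduplicate_schools_py_spec : Claim_equal_deduplicate_schools_py := by
  intro schools _
  unfold Spec_deduplicate_schools_py deduplicate_schools_py deduplicate_schools_py_alt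
  have h := pv_inv schools PySem.Dict.empty PySem.Dict.empty (by simp [PySem.Dict.keys, PySem.Dict.empty])
    (by simp [PySem.Dict.empty]) (by simp [PySem.Dict.empty])
  simp only [PySem.Dict.values, h, List.map_map]
  rfl
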